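-- pv_equiv track=rewrite | github.com/MariaZueva/PythonAlgoritm | task_4.1.py | decision_three
-- ===== SOURCE A (Python) =====
-- def decision_three(matrix):
--     new_m = len(matrix)
--     new_n = len(matrix[0])
--     new_matrix = []
--     for i in range(new_n):
--         new_matrix.append([])
--         for j in range(new_m):
--             new_matrix[i].append(matrix[j][i])
--     max_min = None
--     for i in new_matrix:
--         min_ = min(i)
--         if max_min is None or max_min < min_:
--             max_min = min_
--     return max_min
-- ===== SOURCE B (Python) =====
-- def decision_three(matrix):
--     n = len(matrix[0])
--     col_mins = list(matrix[0])
--     for row in matrix[1:]: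
--         col_mins = [min(col_mins[i], row[i]) for i in range(n)]
--     return max(col_mins) if col_mins else None
-- ===== Notes on version B (the rewrite author's own statement) =====
-- stated objective: alternative
-- what changed: B replaces A's column-major transpose-then-min-per-column-with-running-max by a row-major streaming pass that folds rows into a vector of per-column minimums (elementwise min) and takes one max at the end.
-- outside the precondition, e.g. on decision_three([[]]): A returns None, B returns None; on decision_three([]): A raises IndexError, B raises IndexError; on decision_three([[1, 2], [3]]): A raises IndexError, B raises IndexError
import Mathlib
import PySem

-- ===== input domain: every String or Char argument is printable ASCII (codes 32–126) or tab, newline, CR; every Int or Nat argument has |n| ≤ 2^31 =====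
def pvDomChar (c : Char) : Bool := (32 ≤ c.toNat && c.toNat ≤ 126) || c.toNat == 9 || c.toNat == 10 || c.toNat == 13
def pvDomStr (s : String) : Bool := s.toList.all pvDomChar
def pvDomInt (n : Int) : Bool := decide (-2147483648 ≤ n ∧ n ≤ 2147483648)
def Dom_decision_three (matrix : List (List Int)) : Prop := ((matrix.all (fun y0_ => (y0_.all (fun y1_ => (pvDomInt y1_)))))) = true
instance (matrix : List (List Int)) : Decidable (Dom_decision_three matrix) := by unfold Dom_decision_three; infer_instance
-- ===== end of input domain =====

-- B replaces A's transpose-then-min-per-column by a row-major streaming pass that folds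
-- rows into a vector of per-column minimums and takes one max at the end (different traversal).


-- ===== PORT A =====
def decision_three (matrix : List (List Int)) : Int :=
  let new_m : Int := PySem.List.len matrix
  let new_n : Int := PySem.List.len (PySem.List.pyGetD matrix 0 [])
  let new_matrix : List (List Int) :=
    (PySem.List.pyRange 0 new_n 1).map (fun i =>
      (PySem.List.pyRange 0 new_m 1).map (fun j =>
        PySem.List.pyGetD (PySem.List.pyGetD matrix j []) i 0))
  let max_min : Option Int :=
    new_matrix.foldl (fun acc col =>
      let min_ : Int := (PySem.List.min? col (fun x => x)).getD 0
      match acc with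
      | none => some min_
      | some m => if m < min_ then some min_ else acc) none
  max_min.getD 0

-- ===== PORT B =====
def decision_three_alt (matrix : List (List Int)) : Int :=
  let n : Int := PySem.List.len (PySem.List.pyGetD matrix 0 [])
  let col_mins : List Int :=
    (PySem.List.slice matrix (some 1) none).foldl
      (fun cm row => (PySem.List.pyRange 0 n 1).map (fun i =>
        min (PySem.List.pyGetD cm i 0) (PySem.List.pyGetD row i 0)))
      (PySem.List.pyGetD matrix 0 [])
  (PySem.List.max? col_mins (fun x => x)).getD 0

-- ===== PRECONDITION & SPEC =====
-- Pre_ excludes the empty matrix and matrices with a row shorter than row 0 (A raises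
-- IndexError there), and matrices whose first row is empty (A returns None, not an int).
def Pre_decision_three (matrix : List (List Int)) : Prop :=
  matrix ≠ [] ∧ 0 < (matrix.headD []).length ∧
    ∀ row ∈ matrix, (matrix.headD []).length ≤ row.length
instance (matrix : List (List Int)) : Decidable (Pre_decision_three matrix) := by
  unfold Pre_decision_three; infer_instance
def pvWitness_decision_three : List (List Int) := [[1, 2], [3, 0]]
def Spec_decision_three (matrix : List (List Int)) (out : Int) : Prop := out = decision_three_alt matrix
instance (matrix : List (List Int)) (out : Int) : Decidable (Spec_decision_three matrix out) := by unfold Spec_decision_three; infer_instance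

-- ===== CLAIM (what is proved, stated in full; the proofs are below) =====
def Claim_equal_decision_three : Prop := ∀ (matrix : List (List Int)), Dom_decision_three matrix → Pre_decision_three matrix → Spec_decision_three matrix (decision_three matrix)

-- ===== LEMMAS AND PROOFS =====

-- column minimum of column i, as a fold over the tail rows starting from row 0's entry
def pvColMin (rest : List (List Int)) (r0 : List Int) (i : Int) : Int :=
  rest.foldl (fun m row => min m (PySem.List.pyGetD row i 0)) (PySem.List.pyGetD r0 i 0)

-- B's elementwise-min fold over the rows equals the per-column minimums, pointwise.
lemma b_fold_eq (rest : List (List Int)) (cm : List Int) (n : Nat) (hcm : cm.length = n) :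
    rest.foldl (fun cm row => (PySem.List.pyRange 0 (n : Int) 1).map (fun i =>
        min (PySem.List.pyGetD cm i 0) (PySem.List.pyGetD row i 0))) cm
      = (PySem.List.pyRange 0 (n : Int) 1).map (fun i => pvColMin rest cm i) := by
  induction rest generalizing cm with
  | nil =>
    simp only [List.foldl_nil, pvColMin, List.foldl_nil]
    subst hcm
    exact (PySem.List.map_pyGetD_pyRange_zero' cm 0).symm
  | cons r t ih =>
    simp only [List.foldl_cons]
    rw [ih _ (by simp [PySem.List.length_pyRange_one])]
    apply List.map_congr_left
    intro i hi
    rw [PySem.List.mem_pyRange_one] at hi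
    simp only [pvColMin, List.foldl_cons]
    congr 1
    exact PySem.List.pyGetD_map_pyRange_of_nonneg _ _ _ _ hi.1 hi.2

-- A's running-max loop over a list equals foldl max once it holds a value.
lemma a_max_fold (t : List Int) (x : Int) :
    t.foldl (fun acc v =>
      match acc with
      | none => some v
      | some m => if m < v then some v else acc) (some x)
      = some (t.foldl max x) := by
  induction t generalizing x with
  | nil => rfl
  | cons v t ih =>
    simp only [List.foldl_cons]
    rw [← ih]
    congr 1
    by_cases h : x < v
    · simp [h, max_eq_right h.le]
    · simp [h, max_eq_left (not_lt.1 h)]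

-- A's Option-valued running-max loop (started at none) computes max(l) with default 0.
lemma a_opt_fold (l : List Int) :
    (l.foldl (fun acc v =>
      match acc with
      | none => some v
      | some m => if m < v then some v else acc) none).getD 0
    = (PySem.List.max? l (fun x => x)).getD 0 := by
  cases l with
  | nil => rfl
  | cons c t => simp [List.foldl_cons, a_max_fold, PySem.List.max?_id_cons]

-- ===== VERDICT (by name: the statement is the Claim_ definition above) =====

theorem decision_three_spec : Claim_equal_decision_three := by
  unfold Claim_equal_decision_three
  intro matrix _ hpre
  obtain ⟨hne, hpos, hrows⟩ := hpre
  obtain ⟨r0, rest, rfl⟩ : ∃ r0 rest, matrix = r0 :: rest :=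
    ⟨matrix.headD [], matrix.tail, by cases matrix <;> simp_all⟩
  unfold Spec_decision_three decision_three decision_three_alt
  simp only [PySem.List.pyGetD_zero_cons]
  have hslice : PySem.List.slice (r0 :: rest) (some 1) none = rest := by
    simp [PySem.List.slice_some_none]
  rw [hslice]
  have hn : PySem.List.len r0 = (r0.length : Int) := PySem.List.len_eq r0
  rw [hn, b_fold_eq rest r0 r0.length rfl]
  -- A's column i equals the list (pyGetD r0 i 0 :: rest.map …)
  have hcol : ∀ i : Int,
      (PySem.List.pyRange 0 (PySem.List.len (r0 :: rest)) 1).map (fun j =>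
        PySem.List.pyGetD (PySem.List.pyGetD (r0 :: rest) j []) i 0)
      = PySem.List.pyGetD r0 i 0 :: rest.map (fun row => PySem.List.pyGetD row i 0) := by
    intro i
    have h1 := PySem.List.map_pyGetD_pyRange_zero (r0 :: rest) ([] : List Int)
    calc (PySem.List.pyRange 0 (PySem.List.len (r0 :: rest)) 1).map (fun j =>
            PySem.List.pyGetD (PySem.List.pyGetD (r0 :: rest) j []) i 0)
        = ((PySem.List.pyRange 0 (PySem.List.len (r0 :: rest)) 1).map (fun j =>
            PySem.List.pyGetD (r0 :: rest) j [])).map (fun row => PySem.List.pyGetD row i 0) := by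
          rw [List.map_map]; rfl
      _ = ((r0 :: rest)).map (fun row => PySem.List.pyGetD row i 0) := by rw [h1]
      _ = _ := by simp [List.map_cons]
  rw [List.foldl_map, ← a_opt_fold, List.foldl_map]
  apply congrArg (fun o : Option Int => o.getD 0)
  apply PySem.List.foldl_congr_mem
  intro acc i _
  simp only [hcol i, PySem.List.min?_id_cons, Option.getD_some, List.foldl_map, pvColMin]
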